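-- pv_equiv track=rewrite | github.com/cz-fish/advent-of-code | 2020/22.py | deck_id
-- ===== SOURCE A (Python) =====
-- def deck_id(decks):
--     d = list(decks[0]) + [0] + list(decks[1])
--     q = 51
--     id = 0
--     for v in d:
--         id += v * q
--         q *= 51
--     return id
-- ===== SOURCE B (Python) =====
-- def deck_id(decks):
--     def h(lst):
--         if not lst:
--             return 0
--         return lst[0] + 51 * h(lst[1:])
--     a = decks[0]
--     b = decks[1]
--     return 51 * h(a) + 51 ** (len(a) + 2) * h(b)
-- ===== Notes on version B (the rewrite author's own statement) =====
-- stated objective: alternative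
-- what changed: Instead of building the combined list [deck0,0,deck1] and looping with a running power variable, B evaluates each deck separately with a recursive base-51 Horner helper and combines the two values with a single computed power 51**(len(deck0)+2).
import Mathlib
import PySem

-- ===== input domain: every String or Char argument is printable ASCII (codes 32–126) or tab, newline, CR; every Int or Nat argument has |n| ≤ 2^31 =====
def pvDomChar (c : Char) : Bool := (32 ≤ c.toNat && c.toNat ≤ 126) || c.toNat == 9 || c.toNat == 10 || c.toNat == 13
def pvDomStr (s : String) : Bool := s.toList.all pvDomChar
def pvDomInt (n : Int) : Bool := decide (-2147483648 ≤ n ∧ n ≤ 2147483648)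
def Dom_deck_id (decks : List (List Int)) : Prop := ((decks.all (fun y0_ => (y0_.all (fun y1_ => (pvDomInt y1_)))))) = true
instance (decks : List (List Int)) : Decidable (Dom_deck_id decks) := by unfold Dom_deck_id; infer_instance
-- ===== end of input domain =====

-- B evaluates each deck separately with a recursive base-51 Horner helper and one computed power, instead of A's combined list with a running power accumulator (alternative decomposition, same cost).
-- Pre_ excludes decks with fewer than two lists, on which Python A raises IndexError.


-- ===== PORT A =====
def deck_id (decks : List (List Int)) : Int :=
  let d : List Int := ((PySem.List.pyGet? decks 0).getD []) ++ [0] ++ ((PySem.List.pyGet? decks 1).getD [])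
  (d.foldl (fun (s : Int × Int) v => (s.1 + v * s.2, s.2 * 51)) (0, 51)).1

-- ===== PORT B =====
-- recursive base-51 Horner evaluation of one deck (Source B's helper h)
def deckHorner : List Int → Int
  | [] => 0
  | v :: t => v + 51 * deckHorner t

def deck_id_alt (decks : List (List Int)) : Int :=
  let a : List Int := (PySem.List.pyGet? decks 0).getD []
  let b : List Int := (PySem.List.pyGet? decks 1).getD []
  51 * deckHorner a + 51 ^ (a.length + 2) * deckHorner b

-- ===== PRECONDITION & SPEC =====
-- A (and B) index decks[0] and decks[1]: Python raises IndexError when decks has fewer than two lists.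
def Pre_deck_id (decks : List (List Int)) : Prop := 2 ≤ decks.length
instance (decks : List (List Int)) : Decidable (Pre_deck_id decks) := by unfold Pre_deck_id; infer_instance
def pvWitness_deck_id : List (List Int) := [[3, 1], [2]]

def Spec_deck_id (decks : List (List Int)) (out : Int) : Prop := out = deck_id_alt decks
instance (decks : List (List Int)) (out : Int) : Decidable (Spec_deck_id decks out) := by unfold Spec_deck_id; infer_instance

-- ===== CLAIM (what is proved, stated in full; the proofs are below) =====
def Claim_equal_deck_id : Prop := ∀ (decks : List (List Int)), Dom_deck_id decks → Pre_deck_id decks → Spec_deck_id decks (deck_id decks)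

-- ===== LEMMAS AND PROOFS =====
theorem foldl_pow_eq_horner (d : List Int) (id q : Int) :
    (d.foldl (fun (s : Int × Int) v => (s.1 + v * s.2, s.2 * 51)) (id, q)).1
      = id + q * deckHorner d := by
  induction d generalizing id q with
  | nil => simp [deckHorner]
  | cons v t ih => simp only [List.foldl_cons, ih, deckHorner]; ring

theorem deckHorner_append (x y : List Int) :
    deckHorner (x ++ y) = deckHorner x + 51 ^ x.length * deckHorner y := by
  induction x with
  | nil => simp [deckHorner]
  | cons v t ih => simp [deckHorner, ih, pow_succ]; ring

-- ===== VERDICT (by name: the statement is the Claim_ definition above) =====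
theorem deck_id_spec : Claim_equal_deck_id := by
  intro decks _ _
  unfold Spec_deck_id deck_id deck_id_alt
  simp only [foldl_pow_eq_horner, deckHorner_append, List.length_append, deckHorner, List.length_cons, List.length_nil, pow_succ]
  ring
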